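-- pv_equiv track=rewrite | github.com/Kolbjoern/AdventOfCode | day18.py | findInnerMost
-- ===== SOURCE A (Python) =====
-- def findInnerMost(string):
-- 	current_inner = 0
-- 	max_inner = 0
-- 	index = -1
--
-- 	for i, letter in enumerate(string):
-- 		if letter == '(':
-- 			current_inner += 1
--
-- 			if current_inner > max_inner:
-- 				max_inner = current_inner
-- 				index = i
--
-- 		if letter == ')':
-- 			if current_inner > 0:
-- 				current_inner -= 1
-- 			else:
-- 				return -1
--
-- 	if current_inner != 0:
-- 		return -1
--
-- 	return index
-- ===== SOURCE B (Python) =====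
-- def findInnerMost(string):
-- 	depth = 0
-- 	mn = 0
-- 	depths = []
-- 	for ch in string:
-- 		if ch == '(':
-- 			depth += 1
-- 		elif ch == ')':
-- 			depth -= 1
-- 		depths.append(depth)
-- 		if depth < mn:
-- 			mn = depth
-- 	if mn < 0 or depth != 0:
-- 		return -1
-- 	m = max(depths, default=0)
-- 	if m == 0:
-- 		return -1
-- 	return depths.index(m)
-- ===== Notes on version B (the rewrite author's own statement) =====
-- stated objective: alternative
-- what changed: Replaces A's single stateful scan with early returns and a running argmax by a prefix-depth decomposition: one pass builds the cumulative-depth list and its running minimum, then validation (min depth, final depth) is checked once and the answer is the first index whose cumulative depth equals the maximum depth.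
import Mathlib
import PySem

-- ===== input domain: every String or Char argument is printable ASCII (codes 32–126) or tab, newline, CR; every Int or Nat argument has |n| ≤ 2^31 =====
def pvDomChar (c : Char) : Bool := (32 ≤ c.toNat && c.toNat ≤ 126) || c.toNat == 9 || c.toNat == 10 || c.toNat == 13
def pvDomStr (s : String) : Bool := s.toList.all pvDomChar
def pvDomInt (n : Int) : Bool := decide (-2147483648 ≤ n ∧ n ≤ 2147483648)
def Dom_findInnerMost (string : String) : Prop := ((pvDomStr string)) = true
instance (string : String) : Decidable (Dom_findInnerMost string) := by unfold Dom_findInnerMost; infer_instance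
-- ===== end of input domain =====

-- B replaces A's single stateful scan (running depth/max/argmax with early returns) by a
-- prefix-depth decomposition: build the cumulative-depth list and its running minimum, then
-- validate and take the first index achieving the maximum depth. Objective: alternative.

-- ===== PORT A =====
-- the for-loop over enumerate(string) with state (current_inner, max_inner, index) and
-- loop counter i; early 'return -1' becomes the literal -1 in the ')' branch
def findInnerMostGo : List Char → Int → Int → Int → Int → Int
  | [], current, _maxI, index, _i => if current ≠ 0 then -1 else index
  | c :: rest, current, maxI, index, i =>
    let current1 := if c = '(' then current + 1 else current
    let maxI1 := if c = '(' ∧ current1 > maxI then current1 else maxI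
    let index1 := if c = '(' ∧ current1 > maxI then i else index
    if c = ')' then
      if current1 > 0 then findInnerMostGo rest (current1 - 1) maxI1 index1 (i + 1)
      else -1
    else findInnerMostGo rest current1 maxI1 index1 (i + 1)

def findInnerMost (string : String) : Int :=
  findInnerMostGo string.toList 0 0 (-1) 0

-- ===== PORT B =====
-- the for-loop of Source B: fold building (depths, depth, mn)
def findInnerMostAltScan (l : List Char) : List Int × Int × Int :=
  l.foldl (fun (acc : List Int × Int × Int) ch =>
      let d := if ch = '(' then acc.2.1 + 1 else if ch = ')' then acc.2.1 - 1 else acc.2.1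
      (acc.1 ++ [d], d, if d < acc.2.2 then d else acc.2.2))
    ([], 0, 0)

def findInnerMost_alt (string : String) : Int :=
  let r := findInnerMostAltScan string.toList
  let depths := r.1
  let depth := r.2.1
  let mn := r.2.2
  if mn < 0 ∨ depth ≠ 0 then -1
  else
    -- max(depths, default=0): on this branch all depths are ≥ 0, so foldl max 0 is exact
    let m := depths.foldl max 0
    if m = 0 then -1
    else
      match PySem.List.index? depths m with   -- depths.index(m); m ∈ depths here, so never none
      | some n => (n : Int)
      | none => -1

-- ===== PRECONDITION & SPEC =====
def Spec_findInnerMost (string : String) (out : Int) : Prop := out = findInnerMost_alt string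
instance (string : String) (out : Int) : Decidable (Spec_findInnerMost string out) := by unfold Spec_findInnerMost; infer_instance

-- ===== CLAIM (what is proved, stated in full; the proofs are below) =====
def Claim_equal_findInnerMost : Prop := ∀ (string : String), Dom_findInnerMost string → Spec_findInnerMost string (findInnerMost string)

-- ===== LEMMAS AND PROOFS =====

-- per-character depth step
def pvStep (c : Char) (d : Int) : Int := if c = '(' then d + 1 else if c = ')' then d - 1 else d

-- cumulative depth list starting from depth d
def pvDlist : List Char → Int → List Int
  | [], _ => []
  | c :: t, d => pvStep c d :: pvDlist t (pvStep c d)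

-- final depth
def pvFin : List Char → Int → Int
  | [], d => d
  | c :: t, d => pvFin t (pvStep c d)

-- first index (offset i) at which ds takes value M; -1 if absent
def pvFirstAt : List Int → Int → Int → Int
  | [], _, _ => -1
  | d :: t, M, i => if d = M then i else pvFirstAt t M (i + 1)

-- running minimum as in B's loop
def pvMn : List Char → Int → Int → Int
  | [], _, mn => mn
  | c :: t, d, mn => pvMn t (pvStep c d) (if pvStep c d < mn then pvStep c d else mn)

theorem pvScan_eq (l : List Char) : ∀ acc d mn,
    l.foldl (fun (acc : List Int × Int × Int) ch =>
      let d := if ch = '(' then acc.2.1 + 1 else if ch = ')' then acc.2.1 - 1 else acc.2.1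
      (acc.1 ++ [d], d, if d < acc.2.2 then d else acc.2.2)) (acc, d, mn)
    = (acc ++ pvDlist l d, pvFin l d, pvMn l d mn) := by
  induction l with
  | nil => intro acc d mn; simp [pvDlist, pvFin, pvMn]
  | cons c t ih =>
    intro acc d mn
    simp only [List.foldl_cons, pvDlist, pvFin, pvMn, pvStep, ih, List.append_assoc,
      List.singleton_append]

theorem pvMn_lt_iff (l : List Char) : ∀ d mn,
    pvMn l d mn < 0 ↔ (mn < 0 ∨ (pvDlist l d).any (fun x => decide (x < 0)) = true) := by
  induction l with
  | nil => intro d mn; simp [pvMn, pvDlist]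
  | cons c t ih =>
    intro d mn
    simp only [pvMn, pvDlist, List.any_cons, ih, Bool.or_eq_true, decide_eq_true_eq]
    constructor
    · rintro (h | h)
      · split at h <;> omega
      · tauto
    · rintro (h | h | h)
      · left; split <;> omega
      · left; split <;> omega
      · tauto

theorem pvLe_foldl_max (ds : List Int) : ∀ mx : Int, mx ≤ ds.foldl max mx := by
  induction ds with
  | nil => intro mx; simp
  | cons d t ih =>
    intro mx
    have := ih (max mx d)
    simp only [List.foldl_cons]
    omega

theorem pvFoldl_max_mem (ds : List Int) : ∀ mx : Int,
    ds.foldl max mx = mx ∨ ds.foldl max mx ∈ ds := by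
  induction ds with
  | nil => intro mx; simp
  | cons d t ih =>
    intro mx
    rcases ih (max mx d) with h | h
    · simp only [List.foldl_cons, h]
      rcases max_choice mx d with h' | h'
      · left; exact h'
      · right; simp [h']
    · right; simp only [List.foldl_cons]; exact List.mem_cons_of_mem _ h

theorem pvFirstAt_index? (ds : List Int) (M : Int) (hM : M ∈ ds) : ∀ i : Int,
    pvFirstAt ds M i = i + ((PySem.List.index? ds M).getD 0 : Nat) := by
  induction ds with
  | nil => cases hM
  | cons d t ih =>
    intro i
    by_cases hd : d = M
    · subst hd
      rw [PySem.List.index?_cons_self]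
      simp [pvFirstAt]
    · have hMt : M ∈ t := by
        rcases List.mem_cons.1 hM with h | h
        · exact absurd h.symm hd
        · exact h
      rcases (PySem.List.index?_isSome_iff t M).2 hMt |> Option.isSome_iff_exists.1 with ⟨k, hk⟩
      rw [PySem.List.index?_cons_of_ne t hd, hk]
      have h2 : pvFirstAt (d :: t) M i = pvFirstAt t M (i + 1) := by simp [pvFirstAt, hd]
      rw [h2, ih hMt (i + 1), hk]
      simp only [Option.map_some, Option.getD_some]
      omega

-- A's loop equals the prefix-depth formulation, for any valid state
theorem pvGo_eq (l : List Char) : ∀ current maxI index i : Int,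
    0 ≤ current → current ≤ maxI →
    findInnerMostGo l current maxI index i =
      (if (pvDlist l current).any (fun x => decide (x < 0)) = true ∨ pvFin l current ≠ 0 then -1
       else
         let M := (pvDlist l current).foldl max maxI
         if M > maxI then pvFirstAt (pvDlist l current) M i else index) := by
  induction l with
  | nil =>
    intro current maxI index i h0 hle
    simp only [pvDlist, pvFin, List.any_nil, List.foldl_nil, findInnerMostGo]
    split_ifs <;> simp_all <;> omega
  | cons c t ih =>
    intro current maxI index i h0 hle
    by_cases hp : c = ')'
    · -- ')' branch
      have hc : ¬ c = '(' := by subst hp; decide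
      by_cases hpos : current > 0
      · have h1 : findInnerMostGo (c :: t) current maxI index i
            = findInnerMostGo t (current - 1) maxI index (i + 1) := by
          simp [findInnerMostGo, hc, hp, hpos]
        have hd : pvDlist (c :: t) current = (current - 1) :: pvDlist t (current - 1) := by
          simp [pvDlist, pvStep, hc, hp]
        have hf : pvFin (c :: t) current = pvFin t (current - 1) := by
          simp [pvFin, pvStep, hc, hp]
        rw [h1, ih (current - 1) maxI index (i + 1) (by omega) (by omega), hd, hf]
        simp only [List.any_cons, Bool.or_eq_true, decide_eq_true_eq, List.foldl_cons]
        by_cases hbad : ((pvDlist t (current - 1)).any fun x => decide (x < 0)) = true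
            ∨ pvFin t (current - 1) ≠ 0
        · have hbadL : ((current - 1) < 0 ∨ ((pvDlist t (current - 1)).any fun x => decide (x < 0)) = true)
              ∨ pvFin t (current - 1) ≠ 0 := by tauto
          rw [if_pos hbadL, if_pos hbad]
        · have hbadL : ¬ (((current - 1) < 0 ∨ ((pvDlist t (current - 1)).any fun x => decide (x < 0)) = true)
              ∨ pvFin t (current - 1) ≠ 0) := by
            rintro ((h | h) | h) <;> [omega; exact hbad (Or.inl h); exact hbad (Or.inr h)]
          rw [if_neg hbadL, if_neg hbad]
          have hmax : max maxI (current - 1) = maxI := by omega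
          rw [hmax]
          set M := (pvDlist t (current - 1)).foldl max maxI with hM
          have hMge : maxI ≤ M := pvLe_foldl_max _ _
          by_cases hgt : M > maxI
          · rw [if_pos hgt, if_pos hgt]
            simp [pvFirstAt, show ¬ (current - 1 = M) by omega]
          · rw [if_neg hgt, if_neg hgt]
      · -- unmatched ')': early return -1; B sees a negative prefix depth
        have h1 : findInnerMostGo (c :: t) current maxI index i = -1 := by
          simp [findInnerMostGo, hc, hp, show ¬ current > 0 by omega]
        have hd : pvDlist (c :: t) current = (current - 1) :: pvDlist t (current - 1) := by
          simp [pvDlist, pvStep, hc, hp]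
        rw [h1, hd]
        simp only [List.any_cons, Bool.or_eq_true, decide_eq_true_eq]
        rw [if_pos (Or.inl (Or.inl (by omega)))]
    · by_cases hc : c = '('
      · -- '(' branch: depth rises, possibly a new max
        have hd : pvDlist (c :: t) current = (current + 1) :: pvDlist t (current + 1) := by
          simp [pvDlist, pvStep, hc]
        have hf : pvFin (c :: t) current = pvFin t (current + 1) := by
          simp [pvFin, pvStep, hc]
        by_cases hmx : current + 1 > maxI
        · -- new max: current = maxI, index becomes i
          have h1 : findInnerMostGo (c :: t) current maxI index i
              = findInnerMostGo t (current + 1) (current + 1) i (i + 1) := by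
            simp [findInnerMostGo, hc, hp, hmx]
          rw [h1, ih (current + 1) (current + 1) i (i + 1) (by omega) le_rfl, hd, hf]
          simp only [List.any_cons, Bool.or_eq_true, decide_eq_true_eq, List.foldl_cons]
          by_cases hbad : ((pvDlist t (current + 1)).any fun x => decide (x < 0)) = true
              ∨ pvFin t (current + 1) ≠ 0
          · have hbadL : ((current + 1) < 0 ∨ ((pvDlist t (current + 1)).any fun x => decide (x < 0)) = true)
                ∨ pvFin t (current + 1) ≠ 0 := by tauto
            rw [if_pos hbadL, if_pos hbad]
          · have hbadL : ¬ (((current + 1) < 0 ∨ ((pvDlist t (current + 1)).any fun x => decide (x < 0)) = true)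
                ∨ pvFin t (current + 1) ≠ 0) := by
              rintro ((h | h) | h) <;> [omega; exact hbad (Or.inl h); exact hbad (Or.inr h)]
            rw [if_neg hbadL, if_neg hbad]
            have hmax : max maxI (current + 1) = current + 1 := by omega
            rw [hmax]
            set M := (pvDlist t (current + 1)).foldl max (current + 1) with hM
            have hMge : current + 1 ≤ M := pvLe_foldl_max _ _
            have hMgt0 : M > maxI := by omega
            by_cases hgt : M > current + 1
            · rw [if_pos hgt, if_pos hMgt0]
              simp [pvFirstAt, show ¬ (current + 1 = M) by omega]
            · rw [if_neg hgt, if_pos hMgt0]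
              simp [pvFirstAt, show current + 1 = M by omega]
        · -- not a new max: current + 1 ≤ maxI
          have h1 : findInnerMostGo (c :: t) current maxI index i
              = findInnerMostGo t (current + 1) maxI index (i + 1) := by
            simp [findInnerMostGo, hc, hp, hmx]
          rw [h1, ih (current + 1) maxI index (i + 1) (by omega) (by omega), hd, hf]
          simp only [List.any_cons, Bool.or_eq_true, decide_eq_true_eq, List.foldl_cons]
          by_cases hbad : ((pvDlist t (current + 1)).any fun x => decide (x < 0)) = true
              ∨ pvFin t (current + 1) ≠ 0
          · have hbadL : ((current + 1) < 0 ∨ ((pvDlist t (current + 1)).any fun x => decide (x < 0)) = true)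
                ∨ pvFin t (current + 1) ≠ 0 := by tauto
            rw [if_pos hbadL, if_pos hbad]
          · have hbadL : ¬ (((current + 1) < 0 ∨ ((pvDlist t (current + 1)).any fun x => decide (x < 0)) = true)
                ∨ pvFin t (current + 1) ≠ 0) := by
              rintro ((h | h) | h) <;> [omega; exact hbad (Or.inl h); exact hbad (Or.inr h)]
            rw [if_neg hbadL, if_neg hbad]
            have hmax : max maxI (current + 1) = maxI := by omega
            rw [hmax]
            set M := (pvDlist t (current + 1)).foldl max maxI with hM
            have hMge : maxI ≤ M := pvLe_foldl_max _ _
            by_cases hgt : M > maxI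
            · rw [if_pos hgt, if_pos hgt]
              simp [pvFirstAt, show ¬ (current + 1 = M) by omega]
            · rw [if_neg hgt, if_neg hgt]
      · -- other character: only the loop counter advances
        have h1 : findInnerMostGo (c :: t) current maxI index i
            = findInnerMostGo t current maxI index (i + 1) := by
          simp [findInnerMostGo, hc, hp]
        have hd : pvDlist (c :: t) current = current :: pvDlist t current := by
          simp [pvDlist, pvStep, hc, hp]
        have hf : pvFin (c :: t) current = pvFin t current := by
          simp [pvFin, pvStep, hc, hp]
        rw [h1, ih current maxI index (i + 1) h0 hle, hd, hf]
        simp only [List.any_cons, Bool.or_eq_true, decide_eq_true_eq, List.foldl_cons]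
        by_cases hbad : ((pvDlist t current).any fun x => decide (x < 0)) = true
            ∨ pvFin t current ≠ 0
        · have hbadL : (current < 0 ∨ ((pvDlist t current).any fun x => decide (x < 0)) = true)
              ∨ pvFin t current ≠ 0 := by tauto
          rw [if_pos hbadL, if_pos hbad]
        · have hbadL : ¬ ((current < 0 ∨ ((pvDlist t current).any fun x => decide (x < 0)) = true)
              ∨ pvFin t current ≠ 0) := by
            rintro ((h | h) | h) <;> [omega; exact hbad (Or.inl h); exact hbad (Or.inr h)]
          rw [if_neg hbadL, if_neg hbad]
          have hmax : max maxI current = maxI := by omega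
          rw [hmax]
          set M := (pvDlist t current).foldl max maxI with hM
          have hMge : maxI ≤ M := pvLe_foldl_max _ _
          by_cases hgt : M > maxI
          · rw [if_pos hgt, if_pos hgt]
            simp [pvFirstAt, show ¬ (current = M) by omega]
          · rw [if_neg hgt, if_neg hgt]

-- ===== VERDICT (by name: the statement is the Claim_ definition above) =====
theorem findInnerMost_spec : Claim_equal_findInnerMost := by
  intro s _
  unfold Spec_findInnerMost findInnerMost findInnerMost_alt findInnerMostAltScan
  rw [pvScan_eq]
  rw [pvGo_eq s.toList 0 0 (-1) 0 le_rfl le_rfl]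
  simp only [List.nil_append]
  set ds := pvDlist s.toList 0 with hds
  by_cases hbad : ds.any (fun x => decide (x < 0)) = true ∨ pvFin s.toList 0 ≠ 0
  · rw [if_pos hbad]
    have hmn : pvMn s.toList 0 0 < 0 ∨ pvFin s.toList 0 ≠ 0 := by
      rcases hbad with h | h
      · left; exact (pvMn_lt_iff s.toList 0 0).2 (Or.inr h)
      · right; exact h

    rw [if_pos hmn]
  · rw [if_neg hbad]
    push_neg at hbad
    have hmn : ¬ (pvMn s.toList 0 0 < 0 ∨ pvFin s.toList 0 ≠ 0) := by
      rintro (h | h)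
      · rcases (pvMn_lt_iff s.toList 0 0).1 h with h' | h'
        · omega
        · exact absurd h' (by simpa using hbad.1)
      · exact h hbad.2

    rw [if_neg hmn]
    set M := ds.foldl max 0 with hM
    have hMge : (0 : Int) ≤ M := pvLe_foldl_max _ _
    by_cases hM0 : M = 0
    · rw [if_pos hM0]
      simp [show ¬ M > (0:Int) by omega]
    · rw [if_neg hM0]
      have hMgt : M > 0 := by omega
      rw [if_pos hMgt]
      have hMem : M ∈ ds := by
        rcases pvFoldl_max_mem ds 0 with h | h
        · exact absurd h hM0
        · exact h
      rw [pvFirstAt_index? ds M hMem 0]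
      rcases (PySem.List.index?_isSome_iff ds M).2 hMem |> Option.isSome_iff_exists.1 with ⟨k, hk⟩
      rw [hk]
      simp
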